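-- pv_equiv track=rewrite | github.com/Xpra-org/xpra | xpra/x11/xkbhelper.py | gtk_keycodes_to_mappings
-- ===== SOURCE A (Python) =====
-- from typing import Any
-- from collections.abc import Iterable, Sequence
--
-- def gtk_keycodes_to_mappings(gtk_mappings: Iterable[tuple[Any, str, int, int, int]]
--                              ) -> dict[int, set[tuple[str, int]]]:
--     """
--         Takes gtk keycodes as obtained by get_gtk_keymap, in the form:
--         #[(keyval, keyname, keycode, group, level), ..]
--         And returns a list of entries in the form:
--         [[keysym, keycode, index], ..]
--     """
--     # use the keycodes supplied by gtk:
--     mappings: dict[int, set[tuple[str, int]]] = {}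
--     for _, name, keycode, group, level in gtk_mappings:
--         if keycode < 0:
--             continue            # ignore old 'add_if_missing' client side code
--         index = group*2+level
--         mappings.setdefault(keycode, set()).add((name, index))
--     return mappings
-- ===== SOURCE B (Python) =====
-- def gtk_keycodes_to_mappings(gtk_mappings):
--     """
--         Takes gtk keycodes as obtained by get_gtk_keymap, in the form:
--         #[(keyval, keyname, keycode, group, level), ..]
--         And returns a list of entries in the form:
--         [[keysym, keycode, index], ..]
--     """
--     entries = [(keycode, (name, group * 2 + level))
--                for _, name, keycode, group, level in gtk_mappings
--                if keycode >= 0]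
--     order = list(dict.fromkeys(kc for kc, _ in entries))
--     return {kc: {pair for k, pair in entries if k == kc} for kc in order}
-- ===== Notes on version B (the rewrite author's own statement) =====
-- stated objective: alternative
-- what changed: Replaces the incremental dict-of-sets setdefault accumulator with a filter-and-project pass, an ordered dedup of the keycodes, and a per-keycode grouping comprehension.
import Mathlib
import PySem

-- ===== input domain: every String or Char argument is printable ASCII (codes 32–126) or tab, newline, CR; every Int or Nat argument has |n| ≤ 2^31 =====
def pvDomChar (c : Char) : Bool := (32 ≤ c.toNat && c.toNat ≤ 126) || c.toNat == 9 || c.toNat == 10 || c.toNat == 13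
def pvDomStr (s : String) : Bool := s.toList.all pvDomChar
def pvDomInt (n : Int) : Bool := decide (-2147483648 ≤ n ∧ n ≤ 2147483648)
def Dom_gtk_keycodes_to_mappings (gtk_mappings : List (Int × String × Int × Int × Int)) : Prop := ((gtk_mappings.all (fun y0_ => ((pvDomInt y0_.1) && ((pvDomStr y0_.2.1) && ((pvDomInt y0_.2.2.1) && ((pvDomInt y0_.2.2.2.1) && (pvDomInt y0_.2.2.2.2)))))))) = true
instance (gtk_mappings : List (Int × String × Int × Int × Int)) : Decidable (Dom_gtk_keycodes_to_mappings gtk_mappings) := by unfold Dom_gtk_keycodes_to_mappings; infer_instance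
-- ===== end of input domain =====

-- B replaces the incremental dict-of-sets accumulator with filter + ordered dedup of keycodes + per-keycode grouping (alternative decomposition, same result).

-- ===== PORT A =====
def gtk_keycodes_to_mappings (gtk_mappings : List (Int × String × Int × Int × Int)) : List (Int × List (String × Int)) :=
  (gtk_mappings.foldl
    (fun (mappings : PySem.Dict Int (PySem.Set (String × Int))) e =>
      let (_, name, keycode, group, level) := e
      if keycode < 0 then mappings
      else mappings.modify keycode PySem.Set.empty (fun s => PySem.Set.add s (name, group * 2 + level)))
    PySem.Dict.empty).items

-- ===== PORT B =====
def gtk_keycodes_to_mappings_alt (gtk_mappings : List (Int × String × Int × Int × Int)) : List (Int × List (String × Int)) :=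
  let entries : List (Int × (String × Int)) :=
    gtk_mappings.filterMap (fun e =>
      let (_, name, keycode, group, level) := e
      if keycode ≥ 0 then some (keycode, (name, group * 2 + level)) else none)
  let order := PySem.List.dedup (entries.map (·.1))
  order.map (fun kc => (kc, PySem.Set.ofList ((entries.filter (fun p => p.1 == kc)).map (·.2))))

-- ===== PRECONDITION & SPEC =====
def Spec_gtk_keycodes_to_mappings (gtk_mappings : List (Int × String × Int × Int × Int)) (out : List (Int × List (String × Int))) : Prop := out = gtk_keycodes_to_mappings_alt gtk_mappings
instance (gtk_mappings : List (Int × String × Int × Int × Int)) (out : List (Int × List (String × Int))) : Decidable (Spec_gtk_keycodes_to_mappings gtk_mappings out) := by unfold Spec_gtk_keycodes_to_mappings; infer_instance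

-- ===== CLAIM (what is proved, stated in full; the proofs are below) =====
def Claim_equal_gtk_keycodes_to_mappings : Prop := ∀ (gtk_mappings : List (Int × String × Int × Int × Int)), Dom_gtk_keycodes_to_mappings gtk_mappings → Spec_gtk_keycodes_to_mappings gtk_mappings (gtk_keycodes_to_mappings gtk_mappings)

-- ===== LEMMAS AND PROOFS =====

-- the per-entry step of A's loop, after the `keycode < 0` filter
def pvStep (d : PySem.Dict Int (PySem.Set (String × Int))) (p : Int × (String × Int)) : PySem.Dict Int (PySem.Set (String × Int)) :=
  d.modify p.1 PySem.Set.empty (fun s => PySem.Set.add s p.2)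

-- the filtered/projected entry list B starts from
def pvEntries (gtk_mappings : List (Int × String × Int × Int × Int)) : List (Int × (String × Int)) :=
  gtk_mappings.filterMap (fun e =>
    if e.2.2.1 ≥ 0 then some (e.2.2.1, (e.2.1, e.2.2.2.1 * 2 + e.2.2.2.2)) else none)

-- A's fold over the raw list equals the fold of pvStep over the filtered entries
theorem pvFold_eq (m : List (Int × String × Int × Int × Int)) (d : PySem.Dict Int (PySem.Set (String × Int))) :
    m.foldl (fun d e =>
      if e.2.2.1 < 0 then d
      else d.modify e.2.2.1 PySem.Set.empty (fun s => PySem.Set.add s (e.2.1, e.2.2.2.1 * 2 + e.2.2.2.2))) d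
    = (pvEntries m).foldl pvStep d := by
  induction m generalizing d with
  | nil => rfl
  | cons e rest ih =>
    simp only [List.foldl_cons, pvEntries, List.filterMap_cons]
    by_cases h : e.2.2.1 < 0
    · have h' : ¬ e.2.2.1 ≥ 0 := by omega
      rw [if_pos h, if_neg h']
      exact ih d
    · have h' : e.2.2.1 ≥ 0 := by omega
      rw [if_neg h, if_pos h']
      exact ih _

-- value accumulated at key c by the pvStep fold
theorem pvGetD_fold (l : List (Int × (String × Int))) (d : PySem.Dict Int (PySem.Set (String × Int))) (c : Int) :
    (l.foldl pvStep d).getD c PySem.Set.empty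
    = PySem.Set.update (d.getD c PySem.Set.empty) ((l.filter (fun p => p.1 == c)).map (·.2)) := by
  induction l generalizing d with
  | nil => rfl
  | cons p rest ih =>
    simp only [List.foldl_cons, List.filter_cons]
    by_cases h : p.1 = c
    · subst h
      rw [if_pos (by simp), List.map_cons, ih]
      rw [show (pvStep d p).getD p.1 PySem.Set.empty = PySem.Set.add (d.getD p.1 PySem.Set.empty) p.2 from
        PySem.Dict.getD_modify_self ..]
      simp [PySem.Set.update]
    · rw [if_neg (by simp [h]), ih]
      have hne : c ≠ p.1 := fun hc => h (Eq.symm hc)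
      rw [show (pvStep d p).getD c PySem.Set.empty = d.getD c PySem.Set.empty from
        PySem.Dict.getD_modify_of_ne _ _ _ hne]

theorem pvKeys_fold (l : List (Int × (String × Int))) :
    (l.foldl pvStep PySem.Dict.empty).keys = PySem.Set.ofList (l.map (·.1)) := by
  have := PySem.Dict.keys_foldl_modify_key l (key := fun p : Int × (String × Int) => p.1)
    (d0 := PySem.Set.empty) (f := fun _ p => fun s => PySem.Set.add s p.2) (d := PySem.Dict.empty)
  simpa [pvStep, PySem.Dict.keys_empty, PySem.Set.update_nil_left] using this

-- ===== VERDICT (by name: the statement is the Claim_ definition above) =====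
theorem gtk_keycodes_to_mappings_spec : Claim_equal_gtk_keycodes_to_mappings := by
  intro m _
  unfold Spec_gtk_keycodes_to_mappings gtk_keycodes_to_mappings gtk_keycodes_to_mappings_alt
  rw [pvFold_eq]
  have hnd : ((pvEntries m).foldl pvStep PySem.Dict.empty).keys.Nodup := by
    have := PySem.Dict.nodup_keys_foldl_modify_key (pvEntries m)
      (key := fun p : Int × (String × Int) => p.1) (d0 := PySem.Set.empty)
      (f := fun _ p => fun s => PySem.Set.add s p.2) (d := PySem.Dict.empty)
    simpa [pvStep] using this (by simp [PySem.Dict.keys_empty])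
  rw [PySem.Dict.items_eq_map_keys _ hnd PySem.Set.empty, pvKeys_fold]
  simp only [PySem.List.dedup_eq_ofList, pvEntries]
  refine List.map_congr_left ?_
  intro kc _
  rw [pvGetD_fold]
  simp [PySem.Set.update_nil_left, PySem.Dict.getD_empty]
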